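-- pv_equiv track=rewrite | github.com/YashB63/GFG-Daily-Questions | Day 232/Maximum Sum Combination/maximum_sum_combination.py | maxCombinations
-- ===== SOURCE A (Python) =====
-- import heapq
--
-- def maxCombinations(N, K, A, B):
--     A.sort(reverse = True)
--     B.sort(reverse = True)
--     minHeap = []
--
--     for i in range(N):
--         for j in range(N):
--             sum_comb = A[i] + B[j]
--             if len(minHeap) < K:
--                 heapq.heappush(minHeap, sum_comb)
--             else:
--                 if sum_comb > minHeap[0]:
--                     heapq.heapreplace(minHeap, sum_comb)
--                 else:
--                     break
--
--     minHeap.sort(reverse = True)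
--     return minHeap
-- ===== SOURCE B (Python) =====
-- def maxCombinations(N, K, A, B):
--     if N <= 0:
--         return []
--     ta = sorted(A, reverse=True)[:N]
--     tb = sorted(B, reverse=True)[:N]
--     sums = sorted((x + y for x in ta for y in tb), reverse=True)
--     return sums[:K]
-- ===== Notes on version B (the rewrite author's own statement) =====
-- stated objective: simpler
-- what changed: A maintains a size-K min-heap over a double loop with an early break; B simply builds the N*N pairwise sums of the top-N elements, sorts them descending once, and takes the first K (return value only: A sorts its argument lists in place, B does not mutate them).
import Mathlib
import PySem

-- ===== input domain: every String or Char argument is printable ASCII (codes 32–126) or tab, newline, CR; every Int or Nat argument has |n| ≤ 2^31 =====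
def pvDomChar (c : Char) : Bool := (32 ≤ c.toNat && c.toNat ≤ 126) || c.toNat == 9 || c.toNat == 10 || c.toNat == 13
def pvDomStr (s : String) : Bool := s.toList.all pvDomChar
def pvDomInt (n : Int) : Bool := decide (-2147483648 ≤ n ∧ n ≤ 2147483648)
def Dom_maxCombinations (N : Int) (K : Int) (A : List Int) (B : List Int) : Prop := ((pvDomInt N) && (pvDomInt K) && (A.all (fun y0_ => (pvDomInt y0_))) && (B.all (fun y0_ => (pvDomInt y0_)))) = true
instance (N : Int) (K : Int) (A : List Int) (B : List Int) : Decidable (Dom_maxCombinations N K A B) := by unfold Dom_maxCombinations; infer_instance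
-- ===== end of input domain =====

-- B replaces A's size-K min-heap with one descending sort of all pairwise sums plus a take-K
-- (objective: simpler).  Equivalence is about the RETURN value only: Python A sorts its
-- argument lists in place, B does not mutate them.

-- ===== PORT A =====
-- heapq model: the heap is represented by its contents kept sorted ascending; this is exact
-- for every observation A makes of it (heap[0] is the minimum, heappush adds an element,
-- heapreplace pops the minimum and adds an element, and the heap is sorted at the end).
def pvHeapPush (x : Int) : List Int → List Int
  | [] => [x]
  | y :: ys => if x ≤ y then x :: y :: ys else y :: pvHeapPush x ys

-- inner 'for j in range(N)' loop with its early break, state = the heap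
def pvInnerA (K : Int) (ai : Int) (Bs : List Int) : List Int → List Int → List Int
  | [], S => S
  | j :: js, S =>
    let s := ai + PySem.List.pyGetD Bs j 0
    if (S.length : Int) < K then pvInnerA K ai Bs js (pvHeapPush s S)
    else match S with
      | [] => S                        -- Python raises IndexError on minHeap[0]; outside Pre_
      | m :: t => if m < s then pvInnerA K ai Bs js (pvHeapPush s t) else S

def maxCombinations (N : Int) (K : Int) (A : List Int) (B : List Int) : List Int :=
  let A' := PySem.List.sorted A (fun x => x) true
  let B' := PySem.List.sorted B (fun x => x) true
  let S := (PySem.List.pyRange 0 N 1).foldl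
    (fun S i => pvInnerA K (PySem.List.pyGetD A' i 0) B' (PySem.List.pyRange 0 N 1) S) []
  PySem.List.sorted S (fun x => x) true

-- ===== PORT B =====
def maxCombinations_alt (N : Int) (K : Int) (A : List Int) (B : List Int) : List Int :=
  if N ≤ 0 then []
  else
    let ta := PySem.List.slice (PySem.List.sorted A (fun x => x) true) none (some N)
    let tb := PySem.List.slice (PySem.List.sorted B (fun x => x) true) none (some N)
    let sums := PySem.List.sorted (ta.flatMap (fun x => tb.map (fun y => x + y))) (fun x => x) true
    PySem.List.slice sums none (some K)

-- ===== PRECONDITION & SPEC =====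
-- Pre_ excludes exactly the inputs on which Python A raises IndexError: N larger than one of
-- the lists (A[i]/B[j] out of range) or a positive N with K < 1 (minHeap[0] on an empty heap).
def Pre_maxCombinations (N : Int) (K : Int) (A : List Int) (B : List Int) : Prop :=
  (N ≤ 0 || (N ≤ (A.length : Int) && N ≤ (B.length : Int) && 1 ≤ K)) = true
instance (N : Int) (K : Int) (A : List Int) (B : List Int) : Decidable (Pre_maxCombinations N K A B) := by unfold Pre_maxCombinations; infer_instance

def pvWitness_maxCombinations : Int × Int × List Int × List Int := (2, 3, [1, 5, 2], [4, 4])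

def Spec_maxCombinations (N : Int) (K : Int) (A : List Int) (B : List Int) (out : List Int) : Prop := out = maxCombinations_alt N K A B
instance (N : Int) (K : Int) (A : List Int) (B : List Int) (out : List Int) : Decidable (Spec_maxCombinations N K A B out) := by unfold Spec_maxCombinations; infer_instance

-- ===== CLAIM (what is proved, stated in full; the proofs are below) =====
def Claim_equal_maxCombinations : Prop := ∀ (N : Int) (K : Int) (A : List Int) (B : List Int), Dom_maxCombinations N K A B → Pre_maxCombinations N K A B → Spec_maxCombinations N K A B (maxCombinations N K A B)

-- ===== LEMMAS AND PROOFS =====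

-- the loop body of A as a pure step function on the heap state
def pvStep (K : Int) (S : List Int) (x : Int) : List Int :=
  if (S.length : Int) < K then pvHeapPush x S
  else match S with
    | [] => S
    | m :: t => if m < x then pvHeapPush x t else S

-- insertion sort by pvHeapPush, processing left to right (mirrors the fold of pvStep)
def pvAsc (D : List Int) (L : List Int) : List Int := L.foldl (fun D x => pvHeapPush x D) D

theorem pvHeapPush_length (x : Int) (D : List Int) : (pvHeapPush x D).length = D.length + 1 := by
  induction D with
  | nil => rfl
  | cons y ys ih => simp only [pvHeapPush]; split <;> simp [ih]

theorem pvHeapPush_perm (x : Int) (D : List Int) : (pvHeapPush x D).Perm (x :: D) := by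
  induction D with
  | nil => rfl
  | cons y ys ih =>
    simp only [pvHeapPush]; split
    · exact List.Perm.refl _
    · exact (List.Perm.cons y ih).trans (List.Perm.swap x y ys)

theorem pvHeapPush_pairwise (x : Int) (D : List Int) (hD : D.Pairwise (· ≤ ·)) :
    (pvHeapPush x D).Pairwise (· ≤ ·) := by
  induction D with
  | nil => simp [pvHeapPush]
  | cons y ys ih =>
    rcases List.pairwise_cons.mp hD with ⟨hy, hys⟩
    simp only [pvHeapPush]
    split
    · rename_i hxy
      refine List.pairwise_cons.mpr ⟨?_, hD⟩
      intro z hz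
      rcases List.mem_cons.mp hz with hz | hz
      · omega
      · exact le_trans hxy (hy z hz)
    · rename_i hxy
      refine List.pairwise_cons.mpr ⟨?_, ih hys⟩
      intro z hz
      rcases List.mem_cons.mp ((pvHeapPush_perm x ys).mem_iff.mp hz) with hz | hz
      · subst hz; omega
      · exact hy z hz

-- push past a prefix of elements all < x
theorem pvHeapPush_append (x : Int) (P Q : List Int) (h : ∀ y ∈ P, y < x) :
    pvHeapPush x (P ++ Q) = P ++ pvHeapPush x Q := by
  induction P with
  | nil => rfl
  | cons y ys ih =>
    have hy : y < x := h y (by simp)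
    simp only [List.cons_append, pvHeapPush, if_neg (by omega : ¬ x ≤ y)]
    rw [ih (fun z hz => h z (by simp [hz]))]

-- insert below an index j (some element at i ≤ j satisfies x ≤ D[i]), then dropping j+1 is dropping j
theorem pvHeapPush_drop (x : Int) (D : List Int) (j : Nat)
    (h : ∃ i, i ≤ j ∧ ∃ hi : i < D.length, x ≤ D[i]) :
    (pvHeapPush x D).drop (j + 1) = D.drop j := by
  induction D generalizing j with
  | nil => rcases h with ⟨i, _, hi, _⟩; simp at hi
  | cons y ys ih =>
    rcases h with ⟨i, hij, hi, hx⟩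
    by_cases hxy : x ≤ y
    · simp [pvHeapPush, hxy]
    · have hi0 : i ≠ 0 := by
        intro h0; subst h0; simp at hx; omega
      cases j with
      | zero => omega
      | succ j' =>
        simp only [pvHeapPush, if_neg hxy, List.drop_succ_cons]
        refine ih j' ⟨i - 1, by omega, ⟨by simp at hi; omega, ?_⟩⟩
        have : (y :: ys)[i] = ys[i - 1]'(by simp at hi; omega) := by
          rcases Nat.exists_eq_succ_of_ne_zero hi0 with ⟨i', rfl⟩
          simp
        omega

-- KEY STEP: one pvStep on the tail-window state equals inserting then re-taking the window
theorem pvStep_insert (K : Int) (D : List Int) (hD : D.Pairwise (· ≤ ·)) (x : Int) :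
    pvStep K (D.drop (D.length - K.toNat)) x
      = (pvHeapPush x D).drop (D.length + 1 - K.toNat) := by
  have hlen : (D.drop (D.length - K.toNat)).length = D.length - (D.length - K.toNat) := by
    simp [List.length_drop]
  by_cases hnk : D.length < K.toNat
  · have h1 : D.length - K.toNat = 0 := by omega
    have h2 : D.length + 1 - K.toNat = 0 := by omega
    rw [h1, h2]
    unfold pvStep
    rw [if_pos (by simp only [List.drop_zero]; omega)]
    simp
  · have hcond : ¬ ((D.drop (D.length - K.toNat)).length : Int) < K := by
      rw [hlen]; omega
    unfold pvStep
    rw [if_neg hcond]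
    cases hS : D.drop (D.length - K.toNat) with
    | nil =>
      have hk0 : K.toNat = 0 := by
        have := congrArg List.length hS
        rw [hlen] at this; simp at this; omega
      rw [List.drop_eq_nil_iff.mpr (by rw [pvHeapPush_length]; omega)]
    | cons m t =>
      have hk1 : 1 ≤ K.toNat := by
        have := congrArg List.length hS
        rw [hlen] at this; simp at this; omega
      have hmget : D[D.length - K.toNat]? = some m := by
        have : (D.drop (D.length - K.toNat))[0]? = some m := by rw [hS]; rfl
        rwa [List.getElem?_drop, Nat.add_zero] at this
      have hmlt : D.length - K.toNat < D.length := by omega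
      have hmval : D[D.length - K.toNat]'hmlt = m := by
        have h2 := hmget
        rw [List.getElem?_eq_getElem hmlt] at h2
        exact Option.some_inj.mp h2
      have hpg := List.pairwise_iff_getElem.mp hD
      show (if m < x then pvHeapPush x t else m :: t)
          = (pvHeapPush x D).drop (D.length + 1 - K.toNat)
      by_cases hmx : m < x
      · rw [if_pos hmx]
        have htt : t = D.drop (D.length - K.toNat + 1) := by
          have h3 : (D.drop (D.length - K.toNat)).tail = t := by rw [hS]; rfl
          rw [List.tail_drop] at h3
          exact h3.symm
        have hall : ∀ y ∈ D.take (D.length - K.toNat + 1), y < x := by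
          intro y hy
          obtain ⟨i, hi, hyv⟩ := List.getElem_of_mem hy
          have hiD : i < D.length := by
            have h4 := hi; simp [List.length_take] at h4; omega
          have hyD : y = D[i]'hiD := by rw [← hyv, List.getElem_take]
          rcases Nat.lt_or_ge i (D.length - K.toNat) with hlt | hge
          · have h5 := hpg i (D.length - K.toNat) hiD hmlt hlt
            rw [hmval] at h5
            rw [hyD]
            exact lt_of_le_of_lt h5 hmx
          · have hieq : i = D.length - K.toNat := by
              have h4 := hi; simp [List.length_take] at h4; omega
            subst hieq
            have h6 : y = m := by rw [hyD]; exact hmval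
            omega
        have hsplit : pvHeapPush x D
            = D.take (D.length - K.toNat + 1) ++ pvHeapPush x (D.drop (D.length - K.toNat + 1)) := by
          conv_lhs => rw [← List.take_append_drop (D.length - K.toNat + 1) D]
          exact pvHeapPush_append x _ _ hall
        have hjlen : (D.take (D.length - K.toNat + 1)).length = D.length + 1 - K.toNat := by
          simp [List.length_take]; omega
        rw [htt, hsplit, ← hjlen, List.drop_left]
      · rw [if_neg hmx]
        rw [← hS]
        have h7 : D.length + 1 - K.toNat = (D.length - K.toNat) + 1 := by omega
        rw [h7]
        exact (pvHeapPush_drop x D (D.length - K.toNat)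
          ⟨D.length - K.toNat, le_refl _, hmlt, by rw [hmval]; omega⟩).symm

-- the fold invariant
theorem pvFold_inv (K : Int) (L D : List Int) (hD : D.Pairwise (· ≤ ·)) :
    L.foldl (pvStep K) (D.drop (D.length - K.toNat))
      = (pvAsc D L).drop ((pvAsc D L).length - K.toNat) := by
  induction L generalizing D with
  | nil => rfl
  | cons x xs ih =>
    simp only [List.foldl_cons, pvAsc] at *
    rw [pvStep_insert K D hD x, ← pvHeapPush_length x D]
    exact ih (pvHeapPush x D) (pvHeapPush_pairwise x D hD)

theorem pvFoldl_noop (K : Int) (S L : List Int) (h : ∀ v ∈ L, pvStep K S v = S) :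
    L.foldl (pvStep K) S = S := by
  induction L with
  | nil => rfl
  | cons v vs ih =>
    simp only [List.foldl_cons, h v (by simp)]
    exact ih (fun u hu => h u (by simp [hu]))

-- the inner loop with its break equals the plain fold of pvStep over the row's values,
-- provided the row values are non-increasing
theorem pvInnerA_eq_foldl (K : Int) (ai : Int) (Bs : List Int) (js : List Int) (S : List Int)
    (hmono : (js.map (fun j => ai + PySem.List.pyGetD Bs j 0)).Pairwise (fun a b => b ≤ a)) :
    pvInnerA K ai Bs js S
      = (js.map (fun j => ai + PySem.List.pyGetD Bs j 0)).foldl (pvStep K) S := by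
  induction js generalizing S with
  | nil => rfl
  | cons j js ih =>
    rw [List.map_cons] at hmono ⊢
    rcases List.pairwise_cons.mp hmono with ⟨hhead, htail⟩
    rw [List.foldl_cons]
    show (if (S.length : Int) < K then
            pvInnerA K ai Bs js (pvHeapPush (ai + PySem.List.pyGetD Bs j 0) S)
          else match S with
            | [] => S
            | m :: t => if m < ai + PySem.List.pyGetD Bs j 0 then
                pvInnerA K ai Bs js (pvHeapPush (ai + PySem.List.pyGetD Bs j 0) t) else S)
        = _
    by_cases h1 : (S.length : Int) < K
    · rw [if_pos h1]
      have hstep : pvStep K S (ai + PySem.List.pyGetD Bs j 0)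
          = pvHeapPush (ai + PySem.List.pyGetD Bs j 0) S := by
        unfold pvStep; rw [if_pos h1]
      rw [hstep]
      exact ih _ htail
    · rw [if_neg h1]
      cases S with
      | nil =>
        have hstep : ∀ v, pvStep K ([] : List Int) v = [] := by
          intro v; unfold pvStep; rw [if_neg h1]
        rw [hstep]
        exact (pvFoldl_noop K [] _ (fun v _ => hstep v)).symm
      | cons m t =>
        show (if m < ai + PySem.List.pyGetD Bs j 0 then
                pvInnerA K ai Bs js (pvHeapPush (ai + PySem.List.pyGetD Bs j 0) t)
              else m :: t) = _
        by_cases h2 : m < ai + PySem.List.pyGetD Bs j 0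
        · rw [if_pos h2]
          have hstep : pvStep K (m :: t) (ai + PySem.List.pyGetD Bs j 0)
              = pvHeapPush (ai + PySem.List.pyGetD Bs j 0) t := by
            unfold pvStep
            rw [if_neg h1]
            show (if m < ai + PySem.List.pyGetD Bs j 0 then
                    pvHeapPush (ai + PySem.List.pyGetD Bs j 0) t else m :: t) = _
            rw [if_pos h2]
          rw [hstep]
          exact ih _ htail
        · rw [if_neg h2]
          have hstep : ∀ v, v ≤ ai + PySem.List.pyGetD Bs j 0 → pvStep K (m :: t) v = m :: t := by
            intro v hv; unfold pvStep
            rw [if_neg h1]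
            show (if m < v then pvHeapPush v t else m :: t) = m :: t
            rw [if_neg (by omega)]
          rw [hstep _ (le_refl _)]
          exact (pvFoldl_noop K (m :: t) _ (fun v hv => by
            obtain ⟨j', hj', rfl⟩ := List.mem_map.mp hv
            exact hstep _ (hhead _ hv))).symm

-- indexing a prefix of the list by range equals taking the prefix
theorem pvMap_getD_range (xs : List Int) (N : Int) (_h0 : 0 ≤ N) (h : N ≤ (xs.length : Int)) :
    (PySem.List.pyRange 0 N 1).map (fun j => PySem.List.pyGetD xs j 0) = xs.take N.toNat := by
  rw [PySem.List.pyRange_one, List.map_map]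
  apply List.ext_getElem
  · simp; omega
  · intro i h1 h2
    simp only [List.getElem_map, List.getElem_range, Function.comp_apply, List.getElem_take]
    have hiN : i < N.toNat := by simpa using h1
    have : (0 : Int) + (i : Int) = ((i : Nat) : Int) := by omega
    rw [this, PySem.List.pyGetD_natCast]
    have hix : i < xs.length := by omega
    simp [List.getD_eq_getElem?_getD, List.getElem?_eq_getElem hix]

theorem pvFoldl_getD_range {β : Type} (xs : List Int) (N : Int) (h0 : 0 ≤ N)
    (h : N ≤ (xs.length : Int)) (g : β → Int → β) (init : β) :
    (PySem.List.pyRange 0 N 1).foldl (fun acc j => g acc (PySem.List.pyGetD xs j 0)) init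
      = (xs.take N.toNat).foldl g init := by
  rw [← pvMap_getD_range xs N h0 h, List.foldl_map]

-- any antitone permutation IS the descending sort (ties are equal values)
theorem pvDesc_eq (xs ys : List Int) (hp : ys.Perm xs) (hs : ys.Pairwise (fun a b => b ≤ a)) :
    PySem.List.sorted xs (fun x => x) true = ys := by
  apply List.eq_of_perm_of_sorted (le := fun a b => b ≤ a)
  · intro a b _ _ h1 h2; omega
  · exact PySem.List.sorted_pairwise_rev xs (fun x => x)
  · exact hs
  · exact (PySem.List.sorted_perm xs _ true).trans hp.symm

theorem pvAsc_pairwise (D L : List Int) (hD : D.Pairwise (· ≤ ·)) :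
    (pvAsc D L).Pairwise (· ≤ ·) := by
  induction L generalizing D with
  | nil => exact hD
  | cons x xs ih => exact ih _ (pvHeapPush_pairwise x D hD)

theorem pvAsc_perm (D L : List Int) : (pvAsc D L).Perm (D ++ L) := by
  induction L generalizing D with
  | nil => simp [pvAsc]
  | cons x xs ih =>
    show (pvAsc (pvHeapPush x D) xs).Perm (D ++ x :: xs)
    have h1 : (pvAsc (pvHeapPush x D) xs).Perm (pvHeapPush x D ++ xs) := ih _
    have h2 : (pvHeapPush x D ++ xs).Perm ((x :: D) ++ xs) :=
      (pvHeapPush_perm x D).append_right xs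
    exact h1.trans (h2.trans List.perm_middle.symm)

theorem pvFlatMap_foldl {α β : Type} (l : List α) (f : α → List Int) (g : β → Int → β) (init : β) :
    (l.flatMap f).foldl g init = l.foldl (fun acc a => (f a).foldl g acc) init := by
  induction l generalizing init with
  | nil => rfl
  | cons a l ih => simp only [List.flatMap_cons, List.foldl_append, List.foldl_cons, ih]

-- ===== VERDICT (by name: the statement is the Claim_ definition above) =====
theorem maxCombinations_spec : Claim_equal_maxCombinations := by
  intro N K A B _ hPre
  unfold Spec_maxCombinations maxCombinations maxCombinations_alt
  by_cases hN : N ≤ 0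
  · rw [if_pos hN, PySem.List.pyRange_one_eq_nil hN]
    rfl
  · have hN' : 0 < N := by omega
    have hPre' : N ≤ (A.length : Int) ∧ N ≤ (B.length : Int) ∧ 1 ≤ K := by
      unfold Pre_maxCombinations at hPre
      simp at hPre
      rcases hPre with h | h
      · omega
      · exact ⟨h.1.1, h.1.2, h.2⟩
    obtain ⟨hA, hB, hK⟩ := hPre'

    rw [if_neg (by omega)]
    show PySem.List.sorted
        ((PySem.List.pyRange 0 N 1).foldl
          (fun S i => pvInnerA K
            (PySem.List.pyGetD (PySem.List.sorted A (fun x => x) true) i 0)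
            (PySem.List.sorted B (fun x => x) true) (PySem.List.pyRange 0 N 1) S) [])
        (fun x => x) true
      = PySem.List.slice
          (PySem.List.sorted
            ((PySem.List.slice (PySem.List.sorted A (fun x => x) true) none (some N)).flatMap
              (fun x => (PySem.List.slice (PySem.List.sorted B (fun x => x) true) none (some N)).map
                (fun y => x + y)))
            (fun x => x) true)
          none (some K)
    set A' := PySem.List.sorted A (fun x => x) true with hA'def
    set B' := PySem.List.sorted B (fun x => x) true with hB'def
    have hlenA : N ≤ (A'.length : Int) := by
      rw [hA'def, PySem.List.length_sorted]; exact hA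
    have hlenB : N ≤ (B'.length : Int) := by
      rw [hB'def, PySem.List.length_sorted]; exact hB
    have hBdesc : (B'.take N.toNat).Pairwise (fun a b => b ≤ a) :=
      (PySem.List.sorted_pairwise_rev B (fun x => x)).sublist (List.take_sublist _ _)
    -- the inner loop is a fold of pvStep over the row values
    have hrow : ∀ (a : Int) (S : List Int),
        pvInnerA K a B' (PySem.List.pyRange 0 N 1) S
          = ((B'.take N.toNat).map (fun y => a + y)).foldl (pvStep K) S := by
      intro a S
      have hm : (PySem.List.pyRange 0 N 1).map (fun j => a + PySem.List.pyGetD B' j 0)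
          = (B'.take N.toNat).map (fun y => a + y) := by
        rw [show (fun j => a + PySem.List.pyGetD B' j 0)
              = (fun y => a + y) ∘ (fun j => PySem.List.pyGetD B' j 0) from rfl,
            ← List.map_map, pvMap_getD_range B' N (by omega) hlenB]
      rw [pvInnerA_eq_foldl K a B' _ S (by
        rw [hm]
        exact (List.pairwise_map).mpr (hBdesc.imp (by intro u v h; omega))), hm]
    have hsums : (A'.take N.toNat).flatMap (fun a => (B'.take N.toNat).map (fun y => a + y))
        = (PySem.List.slice A' none (some N)).flatMap
            (fun x => (PySem.List.slice B' none (some N)).map (fun y => x + y)) := by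
      rw [PySem.List.slice_to A' (by omega), PySem.List.slice_to B' (by omega)]
    set V := (A'.take N.toNat).flatMap (fun a => (B'.take N.toNat).map (fun y => a + y)) with hVdef
    -- whole double loop = one fold of pvStep over all pairwise sums
    have houter : (PySem.List.pyRange 0 N 1).foldl
        (fun S i => pvInnerA K (PySem.List.pyGetD A' i 0) B' (PySem.List.pyRange 0 N 1) S) []
          = V.foldl (pvStep K) [] := by
      simp only [hrow]
      rw [pvFoldl_getD_range A' N (by omega) hlenA
        (fun S a => ((B'.take N.toNat).map (fun y => a + y)).foldl (pvStep K) S) []]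
      rw [hVdef, pvFlatMap_foldl]
    rw [houter]
    -- the invariant: the final heap is the ascending tail window of the insertion sort of V
    set E := pvAsc [] V with hEdef
    have hinv : V.foldl (pvStep K) [] = E.drop (E.length - K.toNat) := by
      have := pvFold_inv K V [] List.Pairwise.nil
      simpa using this
    rw [hinv]
    have hEpairwise : E.Pairwise (· ≤ ·) := pvAsc_pairwise [] V (by simp)
    have hEperm : E.Perm V := (pvAsc_perm [] V).trans (by simp)
    -- A's final sort of the heap just reverses it
    have hAout : PySem.List.sorted (E.drop (E.length - K.toNat)) (fun x => x) true
        = (E.drop (E.length - K.toNat)).reverse := by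
      apply pvDesc_eq
      · exact (List.reverse_perm _)
      · exact List.pairwise_reverse.mpr (hEpairwise.sublist (List.drop_sublist _ _))
    -- B's descending sort of all sums is the reverse of the insertion sort
    have hBout : PySem.List.sorted V (fun x => x) true = E.reverse := by
      apply pvDesc_eq
      · exact (List.reverse_perm E).trans hEperm
      · exact List.pairwise_reverse.mpr hEpairwise
    rw [← hsums, hBout, PySem.List.slice_to E.reverse (by omega)]
    rw [hAout, List.reverse_drop]
    by_cases hk : K.toNat ≤ E.length
    · congr 1
      omega
    · rw [List.take_of_length_le (by simp; omega), List.take_of_length_le (by simp; omega)]
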